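-- pv_equiv track=rewrite | github.com/AlternativeFuture/guided_learning | dealer_on_duty /day_12/assignment_2.py | longest_word_and_length
-- ===== SOURCE A (Python) =====
-- def longest_word_and_length(words: list) -> tuple:
--     if not words:
--         return None, 0
--
--     longest_word = ""
--     max_length = 0
--
--     for word in words:
--         if len(word) > max_length:
--             longest_word = word
--             max_length = len(word)
--
--     return longest_word, max_length
-- ===== SOURCE B (Python) =====
-- def longest_word_and_length(words: list) -> tuple:
--     if not words:
--         return None, 0
--     ordered = sorted(words, key=len, reverse=True)
--     return ordered[0], len(ordered[0])
-- ===== Notes on version B (the rewrite author's own statement) =====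
-- stated objective: alternative
-- what changed: Replaces the single-pass running-max loop with a sort-then-index strategy: stable sort by length descending and read off the first element (stability preserves A's first-wins tie-breaking).
import Mathlib
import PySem

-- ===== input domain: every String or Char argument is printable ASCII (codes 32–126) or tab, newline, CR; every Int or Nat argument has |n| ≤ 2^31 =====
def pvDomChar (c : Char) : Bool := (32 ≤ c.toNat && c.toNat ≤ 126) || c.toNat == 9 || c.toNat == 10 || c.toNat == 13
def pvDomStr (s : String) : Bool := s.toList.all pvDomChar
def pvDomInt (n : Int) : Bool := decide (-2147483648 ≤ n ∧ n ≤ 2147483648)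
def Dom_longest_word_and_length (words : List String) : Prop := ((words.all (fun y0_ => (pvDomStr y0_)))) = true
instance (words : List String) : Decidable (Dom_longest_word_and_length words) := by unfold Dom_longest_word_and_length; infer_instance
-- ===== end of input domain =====

-- B replaces A's single-pass running-max loop with a stable sort by length (descending) and reads off the first element; same results, different algorithm.


-- ===== PORT A =====
def longest_word_and_length (words : List String) : Option String × Int :=
  if words.isEmpty then (none, 0)
  else
    let s := words.foldl
      (fun (s : String × Int) w =>
        if PySem.Str.len w > s.2 then (w, PySem.Str.len w) else s)
      ("", 0)
    (some s.1, s.2)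

-- ===== PORT B =====
def longest_word_and_length_alt (words : List String) : Option String × Int :=
  if words.isEmpty then (none, 0)
  else
    let ordered := PySem.List.sorted words (fun w => PySem.Str.len w) true
    (some (PySem.List.pyGetD ordered 0 ""), PySem.Str.len (PySem.List.pyGetD ordered 0 ""))

-- ===== PRECONDITION & SPEC =====
def Spec_longest_word_and_length (words : List String) (out : Option String × Int) : Prop := out = longest_word_and_length_alt words
instance (words : List String) (out : Option String × Int) : Decidable (Spec_longest_word_and_length words out) := by unfold Spec_longest_word_and_length; infer_instance

-- ===== CLAIM (what is proved, stated in full; the proofs are below) =====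
def Claim_equal_longest_word_and_length : Prop := ∀ (words : List String), Dom_longest_word_and_length words → Spec_longest_word_and_length words (longest_word_and_length words)

-- ===== LEMMAS AND PROOFS =====

-- A's loop body as a named step function.
def pvStep (s : String × Int) (w : String) : String × Int :=
  if PySem.Str.len w > s.2 then (w, PySem.Str.len w) else s

-- Core invariant: on a nonempty list the descending stable sort starts with A's
-- running-max word, and A's tracked length is that word's length.
theorem pv_core (words : List String) (h : words ≠ []) :
    ∃ t, PySem.List.sorted words (fun w => PySem.Str.len w) true
           = (words.foldl pvStep ("", 0)).1 :: t
       ∧ (words.foldl pvStep ("", 0)).2 = PySem.Str.len (words.foldl pvStep ("", 0)).1 := by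
  induction words using List.reverseRecOn with
  | nil => exact absurd rfl h
  | append_singleton ws w ih =>
    rw [PySem.List.sorted_rev_eq_foldl_insertBy, List.foldl_append, List.foldl_append,
        ← PySem.List.sorted_rev_eq_foldl_insertBy]
    rcases List.eq_nil_or_concat' ws with rfl | ⟨_, _, rfl⟩
    · -- singleton list [w]
      simp only [List.foldl_nil, List.foldl_cons, pvStep]
      have hnil : PySem.List.sorted ([] : List String) (fun w => PySem.Str.len w) true = [] := rfl
      by_cases hc : 0 < w.length
      · refine ⟨[], ?_, ?_⟩ <;> simp [hnil, PySem.List.insertBy, PySem.Str.len_eq, hc]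
      · -- length 0 forces w = "", the loop's initial word
        have hwe : w = "" := String.length_eq_zero_iff.mp (by omega)
        refine ⟨[], ?_, ?_⟩ <;> simp [hnil, PySem.List.insertBy, PySem.Str.len_eq, hwe]
    · obtain ⟨t, hsort, hlen⟩ := ih (by simp)
      rw [hsort]
      set s := (List.foldl pvStep ("", 0) _) with hs
      simp only [List.foldl_cons, List.foldl_nil, pvStep]
      have hlen' : s.2 = (s.1.length : Int) := by simpa [PySem.Str.len_eq] using hlen
      by_cases hc : s.1.length < w.length
      · have hg : s.2 < ((w.length : Nat) : Int) := by rw [hlen']; exact_mod_cast hc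
        refine ⟨s.1 :: t, ?_, ?_⟩ <;>
          simp [PySem.List.insertBy, PySem.Str.len_eq, hc, hg]
      · refine ⟨PySem.List.insertBy (fun a b => decide (PySem.Str.len b < PySem.Str.len a)) w t, ?_, ?_⟩ <;>
          simp [PySem.List.insertBy, PySem.Str.len_eq, hc, hlen']
-- ===== VERDICT (by name: the statement is the Claim_ definition above) =====
theorem longest_word_and_length_spec : Claim_equal_longest_word_and_length := by
  intro words _
  unfold Spec_longest_word_and_length longest_word_and_length longest_word_and_length_alt
  by_cases hne : words.isEmpty
  · simp [hne]
  · simp only [hne]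
    obtain ⟨t, hsort, hlen⟩ := pv_core words (by simpa [List.isEmpty_iff] using hne)
    rw [hsort, PySem.List.pyGetD_zero_cons]
    exact Prod.ext rfl (by simpa using hlen)
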